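-- pv_equiv track=rewrite | github.com/naveenkaushik2504/child_language_analyser | task1.py | process_1d
-- ===== SOURCE A (Python) =====
-- def process_1d(line):
--     """Logic to process the Task 1d. It removes the characters '(' or ')' around the words,
--     but retains the words and the symbol '(.)'
--
--     Parameters
--     -----------
--     line: The line that needs to be pre processed for task 1d.
--
--     Returns
--     -----------
--     result_1d: This is the line created after the processing done for the task 1d.
--     """
--
--     result_1d = ""
--     # Iterate until the line becomes empty.
--     while(len(line) != 0):
--         popped_char = ""
--         # If the character is starting with '(' then we need to look for its end and retain the words within it.
--         # We also need to retain the spacial word '(.)'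
--         if(line[0] == '('):
--             small_str = ""
--             while(popped_char != ')'):
--                 popped_char = line.pop(0)
--                 small_str += popped_char
--             if(small_str == "(.)"):
--                 result_1d += small_str
--             else:
--                 result_1d += small_str.lstrip('(').rstrip(')')
--         else:
--             result_1d += line.pop(0)
--     return result_1d
-- ===== SOURCE B (Python) =====
-- def process_1d(line):
--     """Task 1d, single linear scan: strip '(' / ')' around parenthesised groups,
--     keep '(.)' intact.  Unlike A this does not mutate (empty) the input list;
--     equivalence is about the return value only."""
--     out = []
--     i = 0
--     n = len(line)
--     while i < n:
--         if line[i] == '(':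
--             j = line.index(')', i)          # first element equal to ')' at or after i
--             seg = ''.join(line[i:j + 1])
--             out.append(seg if seg == '(.)' else seg.lstrip('(').rstrip(')'))
--             i = j + 1
--         else:
--             out.append(line[i])
--             i += 1
--     return ''.join(out)
-- ===== Notes on version B (the rewrite author's own statement) =====
-- stated objective: faster
-- what changed: Replaces A's destructive pop(0)-driven rescan (each pop shifts the whole list) by a single index-based linear scan that jumps to the matching ')' with list.index, collects pieces in a list and joins them once.
import Mathlib
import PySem

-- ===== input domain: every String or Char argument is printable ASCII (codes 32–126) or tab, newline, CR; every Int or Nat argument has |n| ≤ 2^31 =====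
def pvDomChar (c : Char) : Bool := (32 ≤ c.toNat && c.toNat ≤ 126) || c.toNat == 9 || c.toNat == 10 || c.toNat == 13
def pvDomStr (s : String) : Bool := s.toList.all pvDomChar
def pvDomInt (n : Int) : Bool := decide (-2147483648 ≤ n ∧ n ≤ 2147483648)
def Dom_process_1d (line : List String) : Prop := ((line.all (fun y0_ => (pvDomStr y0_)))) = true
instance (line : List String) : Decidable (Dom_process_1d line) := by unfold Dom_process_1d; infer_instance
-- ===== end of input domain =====

-- B replaces A's destructive pop(0)-driven scan by one index-based linear scan that jumps
-- to the closing ')' and joins the collected pieces once; A empties the caller's list in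
-- place, B does not mutate it — the equivalence proved here is about the RETURN value only.

-- ===== PORT A =====
-- small_str.lstrip('(').rstrip(')') on code points (exact: strips only '(' resp. ')' chars)
def stripParensC (cs : List Char) : List Char :=
  ((cs.dropWhile (· == '(')).reverse.dropWhile (· == ')')).reverse

-- inner `while popped_char != ')': popped_char = line.pop(0); small_str += popped_char`
-- (none = the IndexError from pop on the empty list)
def popLoopA : List String → List Char → Option (List Char × List String)
  | [], _ => none
  | x :: rest, small =>
      if x = ")" then some (small ++ x.toList, rest) else popLoopA rest (small ++ x.toList)

-- (termination helper for loopA: the inner loop consumes at least the head)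
theorem popLoopA_length : ∀ (l : List String) (s : List Char) (out : List Char × List String),
    popLoopA l s = some out → out.2.length < l.length := by
  intro l
  induction l with
  | nil => intro s out h; simp [popLoopA] at h
  | cons x rest ih =>
      intro s out h
      simp only [popLoopA] at h
      split at h
      · cases h; simp
      · exact Nat.lt_trans (ih _ _ h) (by simp)

-- the outer while over the (shrinking) list, accumulating result_1d
def loopA : List String → List Char → Option (List Char)
  | [], acc => some acc
  | x :: rest, acc =>
    if x = "(" then
      match h : popLoopA (x :: rest) [] with
      | none => none
      | some (small, rest') =>
          loopA rest' (acc ++ (if small = ['(', '.', ')'] then small else stripParensC small))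
    else loopA rest (acc ++ x.toList)
termination_by l => l.length
decreasing_by
  · exact popLoopA_length _ _ _ h
  · simp

def process_1d (line : List String) : String :=
  match loopA line [] with
  | some cs => String.ofList cs
  | none => ""   -- unreachable under Pre_: Python raises IndexError here

-- ===== PORT B =====
-- ''.join on code-point lists
def joinC : List (List Char) → List Char
  | [] => []
  | p :: ps => p ++ joinC ps

-- one scan: at '(' jump to the first later ')' (line.index(')', i)) and cut the segment
-- line[i:j+1] out, otherwise keep the element; none = the ValueError from index
def segB : List String → Option (List (List Char))
  | [] => some []
  | x :: rest =>
    if x = "(" then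
      match hd : (x :: rest).dropWhile (fun t => t ≠ ")") with
      | [] => none
      | c :: rest' =>
          let seg := joinC (((x :: rest).takeWhile (fun t => t ≠ ")") ++ [c]).map String.toList)
          (segB rest').map (fun segs =>
            (if seg = ['(', '.', ')'] then seg else stripParensC seg) :: segs)
    else
      (segB rest).map (fun segs => x.toList :: segs)
termination_by l => l.length
decreasing_by
  · have h1 : ((x :: rest).dropWhile (fun t => t ≠ ")")).length ≤ (x :: rest).length :=
      (List.dropWhile_sublist _).length_le
    rw [hd] at h1; simp at h1 ⊢; omega
  · simp

def process_1d_alt (line : List String) : String :=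
  match segB line with
  | some segs => String.ofList (joinC segs)
  | none => ""   -- unreachable under Pre_: Python raises ValueError here

-- ===== PRECONDITION & SPEC =====
-- Pre_ excludes exactly the inputs on which A raises IndexError: an element "(" with no
-- later element ")" makes A's inner pop loop run off the end of the list (B raises there too).
def Pre_process_1d (line : List String) : Prop :=
  ∀ i : Fin line.length, line.get i = "(" →
    ∃ j : Fin line.length, (i : Nat) < (j : Nat) ∧ line.get j = ")"
instance (line : List String) : Decidable (Pre_process_1d line) := by
  unfold Pre_process_1d; infer_instance

def pvWitness_process_1d : List String := ["(", "ab", ")", "x", "(.)", ")"]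

def Spec_process_1d (line : List String) (out : String) : Prop := out = process_1d_alt line
instance (line : List String) (out : String) : Decidable (Spec_process_1d line out) := by
  unfold Spec_process_1d; infer_instance

-- ===== CLAIM (what is proved, stated in full; the proofs are below) =====
def Claim_equal_process_1d : Prop :=
  ∀ (line : List String), Dom_process_1d line → Pre_process_1d line →
    Spec_process_1d line (process_1d line)

-- ===== LEMMAS AND PROOFS =====

-- A's inner pop loop yields the segment up to and including the first ')' element
theorem popLoopA_eq (l : List String) : ∀ (s : List Char),
    popLoopA l s =
      match l.dropWhile (fun t => t ≠ ")") with
      | [] => none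
      | c :: r =>
          some (s ++ joinC ((l.takeWhile (fun t => t ≠ ")") ++ [c]).map String.toList), r) := by
  induction l with
  | nil => intro s; simp [popLoopA]
  | cons x rest ih =>
      intro s
      simp only [popLoopA, List.dropWhile_cons, List.takeWhile_cons]
      by_cases hx : x = ")"
      · simp [hx, joinC]
      · simp only [hx, decide_not, not_false_iff, if_neg, ih (s ++ x.toList)]
        cases hdw : rest.dropWhile (fun t => t ≠ ")") <;>
          simp [hdw, joinC, List.append_assoc]

-- segB on a '(' head, with its match exposed on the dropWhile discriminant
theorem segB_paren (rest : List String) :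
    segB ("(" :: rest) =
      match ("(" :: rest).dropWhile (fun t => t ≠ ")") with
      | [] => none
      | c :: r =>
          (segB r).map (fun segs =>
            (if joinC ((("(" :: rest).takeWhile (fun t => t ≠ ")") ++ [c]).map String.toList)
                  = ['(', '.', ')']
             then joinC ((("(" :: rest).takeWhile (fun t => t ≠ ")") ++ [c]).map String.toList)
             else stripParensC
                    (joinC ((("(" :: rest).takeWhile (fun t => t ≠ ")") ++ [c]).map String.toList)))
              :: segs) := by
  rw [segB.eq_def]
  simp only [if_pos rfl]
  cases hdw : ("(" :: rest).dropWhile (fun t => t ≠ ")") <;> simp [hdw]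

-- the heart of the equivalence: A's accumulator loop equals B's segment list, joined
theorem loopA_eq_segB (l : List String) (acc : List Char) :
    loopA l acc = (segB l).map (fun segs => acc ++ joinC segs) := by
  fun_induction loopA l acc with
  | case1 acc => simp [segB, joinC]
  | case2 rest acc h =>
      rw [popLoopA_eq] at h
      rw [segB_paren]
      cases hdw : ("(" :: rest).dropWhile (fun t => t ≠ ")") with
      | nil => simp
      | cons c r => rw [hdw] at h; simp at h
  | case3 rest acc small rest' h ih =>
      rw [popLoopA_eq] at h
      rw [segB_paren]
      cases hdw : ("(" :: rest).dropWhile (fun t => t ≠ ")") with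
      | nil => rw [hdw] at h; simp at h
      | cons c r =>
          rw [hdw] at h
          simp only [Option.some.injEq, Prod.mk.injEq] at h
          obtain ⟨hsmall, hr⟩ := h
          simp only [dite_eq_ite] at ih
          rw [ih, hr]
          cases hsb : segB rest' <;> simp [hsb, ← hsmall, joinC, List.append_assoc]
  | case4 x rest acc hx ih =>
      rw [ih]
      simp only [segB, if_neg hx]
      cases segB rest <;> simp [joinC, List.append_assoc]

-- ===== VERDICT (by name: the statement is the Claim_ definition above) =====
theorem process_1d_spec : Claim_equal_process_1d := by
  intro line _ _
  unfold Spec_process_1d process_1d process_1d_alt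
  rw [loopA_eq_segB]
  cases segB line <;> simp
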